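-- pv_equiv track=rewrite | github.com/jesseboakye/edge-lab | edge_lab/walkforward.py | rolling_windows
-- ===== SOURCE A (Python) =====
-- def rolling_windows(n: int, train: int, test: int, step: int) -> list[tuple[int, int, int, int]]:
--     windows: list[tuple[int, int, int, int]] = []
--     start = 0
--     while True:
--         train_start = start
--         train_end = train_start + train
--         test_start = train_end
--         test_end = test_start + test
--         if test_end > n:
--             break
--         windows.append((train_start, train_end, test_start, test_end))
--         start += step
--     return windows
-- ===== SOURCE B (Python) =====
-- def rolling_windows(n: int, train: int, test: int, step: int) -> list[tuple[int, int, int, int]]: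
--     slack = n - train - test
--     if slack < 0:
--         return []
--     count = slack // step + 1
--     return [(i * step, i * step + train, i * step + train, i * step + train + test)
--             for i in range(count)]
-- ===== Notes on version B (the rewrite author's own statement) =====
-- stated objective: simpler
-- what changed: Replaces the unbounded while/break loop that advances a mutable start cursor by a closed-form window count (slack//step + 1) and a bounded comprehension over range(count); Pre_ excludes step <= 0 with n >= train+test, where A loops forever.
import Mathlib
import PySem

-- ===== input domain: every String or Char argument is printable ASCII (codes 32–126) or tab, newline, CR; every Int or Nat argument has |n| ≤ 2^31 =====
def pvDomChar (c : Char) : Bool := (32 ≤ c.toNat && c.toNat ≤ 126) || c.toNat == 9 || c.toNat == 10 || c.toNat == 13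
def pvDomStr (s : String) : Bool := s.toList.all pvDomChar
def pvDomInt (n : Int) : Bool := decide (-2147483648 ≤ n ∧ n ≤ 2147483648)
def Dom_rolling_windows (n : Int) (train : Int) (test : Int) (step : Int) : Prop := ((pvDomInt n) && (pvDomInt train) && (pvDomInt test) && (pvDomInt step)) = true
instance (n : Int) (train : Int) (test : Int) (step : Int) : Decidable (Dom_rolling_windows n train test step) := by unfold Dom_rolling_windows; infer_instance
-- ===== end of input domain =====

-- B replaces A's unbounded while/break loop by a closed-form window count and a bounded
-- comprehension over range(count); equivalence is proved on Pre_ (where A terminates).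

-- ===== PORT A =====
-- A's `while True` loop; the `step ≤ 0` guard is a totality guard only: there the Python
-- loop never terminates (outside Pre_), and the recursion must still be well-founded.
def rwLoopA (n train test step start : Int) : List (Int × Int × Int × Int) :=
  if n < start + train + test then []
  else if _h : step ≤ 0 then []
  else (start, start + train, start + train, start + train + test)
        :: rwLoopA n train test step (start + step)
termination_by (n - (start + train + test) + 1).toNat
decreasing_by omega

def rolling_windows (n : Int) (train : Int) (test : Int) (step : Int) : List (Int × Int × Int × Int) :=
  rwLoopA n train test step 0

-- ===== PORT B =====
def rolling_windows_alt (n : Int) (train : Int) (test : Int) (step : Int) : List (Int × Int × Int × Int) :=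
  if n - train - test < 0 then []
  else
    (PySem.List.pyRange 0 (PySem.Int.floordiv (n - train - test) step + 1) 1).map
      (fun i => (i * step, i * step + train, i * step + train, i * step + train + test))

-- ===== PRECONDITION & SPEC =====
-- Pre_ excludes exactly the inputs where Python A never returns: step ≤ 0 while a first
-- window still fits (train+test ≤ n) makes A's while-loop run forever.
def Pre_rolling_windows (n : Int) (train : Int) (test : Int) (step : Int) : Prop :=
  0 < step ∨ n < train + test
instance (n : Int) (train : Int) (test : Int) (step : Int) : Decidable (Pre_rolling_windows n train test step) := by unfold Pre_rolling_windows; infer_instance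

def pvWitness_rolling_windows : Int × Int × Int × Int := (10, 4, 2, 3)

def Spec_rolling_windows (n : Int) (train : Int) (test : Int) (step : Int) (out : List (Int × Int × Int × Int)) : Prop := out = rolling_windows_alt n train test step
instance (n : Int) (train : Int) (test : Int) (step : Int) (out : List (Int × Int × Int × Int)) : Decidable (Spec_rolling_windows n train test step out) := by unfold Spec_rolling_windows; infer_instance

-- ===== CLAIM (what is proved, stated in full; the proofs are below) =====
def Claim_equal_rolling_windows : Prop := ∀ (n : Int) (train : Int) (test : Int) (step : Int), Dom_rolling_windows n train test step → Pre_rolling_windows n train test step → Spec_rolling_windows n train test step (rolling_windows n train test step)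

-- ===== LEMMAS AND PROOFS =====

-- window count remaining when the loop is at `start`
def rwCnt (n train test step start : Int) : Nat :=
  if n - start - train - test < 0 then 0
  else (PySem.Int.floordiv (n - start - train - test) step + 1).toNat

lemma floordiv_nonneg {a b : Int} (ha : 0 ≤ a) (hb : 0 < b) :
    0 ≤ PySem.Int.floordiv a b := by
  simp [PySem.Int.floordiv]
  exact Int.fdiv_nonneg ha (le_of_lt hb)

lemma floordiv_small {a b : Int} (ha : 0 ≤ a) (hab : a < b) :
    PySem.Int.floordiv a b = 0 := by
  simp [PySem.Int.floordiv]
  rw [Int.fdiv_eq_ediv, if_pos (Or.inl (by omega : (0:Int) ≤ b)),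
      Int.ediv_eq_zero_of_lt ha hab]
  ring

lemma floordiv_sub_self {a b : Int} (hb : b ≠ 0) :
    PySem.Int.floordiv (a - b) b = PySem.Int.floordiv a b - 1 := by
  simp [PySem.Int.floordiv]
  have := Int.add_mul_fdiv_right a (-1) hb
  have h1 : a + -1 * b = a - b := by ring
  rw [h1] at this
  omega

lemma rwCnt_succ {n train test step start : Int} (hstep : 0 < step)
    (h : ¬ n < start + train + test) :
    rwCnt n train test step start = rwCnt n train test step (start + step) + 1 := by
  have hr : 0 ≤ n - start - train - test := by omega
  unfold rwCnt
  by_cases h2 : n - (start + step) - train - test < 0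
  · have hlt : n - start - train - test < step := by omega
    rw [if_neg (not_lt.mpr hr), if_pos h2, floordiv_small hr hlt]
    decide
  · have hr2 : 0 ≤ n - (start + step) - train - test := by omega
    have he : n - (start + step) - train - test = (n - start - train - test) - step := by ring
    rw [if_neg (not_lt.mpr hr), if_neg h2, he,
        floordiv_sub_self (by omega : step ≠ 0)]
    have := floordiv_nonneg hr hstep
    omega

lemma rwLoopA_eq (n train test step : Int) (hstep : 0 < step) : ∀ (start : Int),
    rwLoopA n train test step start =
      (List.range (rwCnt n train test step start)).map
        (fun k : Nat => (start + (k : Int) * step, start + (k : Int) * step + train,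
                   start + (k : Int) * step + train, start + (k : Int) * step + train + test)) := by
  intro start
  induction start using rwLoopA.induct n train test step with
  | case1 start h =>
    rw [rwLoopA]
    have hc : rwCnt n train test step start = 0 := by
      unfold rwCnt; rw [if_pos (by omega)]
    rw [if_pos h, hc, List.range_zero, List.map_nil]
  | case2 start h hle => omega
  | case3 start h hle ih =>
    rw [rwLoopA, if_neg h, dif_neg hle, ih,
        rwCnt_succ hstep h, List.range_succ_eq_map, List.map_cons, List.map_map]
    refine congrArg₂ _ ?_ (List.map_congr_left ?_)
    · push_cast; simp only [Prod.mk.injEq]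
      refine ⟨by ring, by ring, by ring, by ring⟩
    · intro k _
      simp only [Function.comp_apply, Prod.mk.injEq]
      push_cast
      refine ⟨by ring, by ring, by ring, by ring⟩

-- ===== VERDICT (by name: the statement is the Claim_ definition above) =====
theorem rolling_windows_spec : Claim_equal_rolling_windows := by
  intro n train test step _ hpre
  unfold Spec_rolling_windows rolling_windows rolling_windows_alt
  rcases hpre with hstep | hsmall
  · rw [rwLoopA_eq n train test step hstep 0]
    by_cases hsl : n - train - test < 0
    · have hc : rwCnt n train test step 0 = 0 := by
        unfold rwCnt; rw [if_pos (by omega)]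
      rw [hc, List.range_zero, List.map_nil, if_pos hsl]
    · have hr : 0 ≤ n - train - test := by omega
      have hcnt : rwCnt n train test step 0 =
          (PySem.Int.floordiv (n - train - test) step + 1).toNat := by
        unfold rwCnt
        rw [if_neg (by omega)]
        norm_num
      rw [hcnt, if_neg hsl, PySem.List.pyRange_one, sub_zero, List.map_map]
      apply List.map_congr_left
      intro k _
      simp only [Function.comp_apply, Prod.mk.injEq]
      refine ⟨by ring, by ring, by ring, by ring⟩
  · rw [rwLoopA, if_pos (by omega), if_pos (by omega : n - train - test < 0)]
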